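-- pv_equiv track=rewrite | github.com/iplaypi/iplaypistudy | iplaypistudy-normal/src/bin/20180718/weibo_util.py | id2mid
-- ===== SOURCE A (Python) =====
-- ALPHABET = "0123456789abcdefghijklmnopqrstuvwxyzABCDEFGHIJKLMNOPQRSTUVWXYZ"
--
-- def base62_decode(string, alphabet=ALPHABET):
--     """Decode a Base X encoded string into the number
--     Arguments:
--     - `string`: The encoded string
--     - `alphabet`: The alphabet to use for encoding
--     """
--     base = len(alphabet)
--     strlen = len(string)
--     num = 0
--     idx = 0
--     for char in string:
--         power = (strlen - (idx + 1))
--         num += alphabet.index(char) * (base ** power)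
--         idx += 1
--     return num
--
-- def id2mid(id):
--     id = str(id)[::-1]
--     size = int(len(id) / 4) if len(id) % 4 == 0 else int(len(id) / 4 + 1)
--     result = []
--     for i in range(size):
--         s = id[i * 4: (i + 1) * 4][::-1]
--         s = str(base62_decode(str(s)))
--         s_len = len(s)
--         if i < size - 1 and s_len < 7:
--             s = (7 - s_len) * '0' + s
--         result.append(s)
--     result.reverse()
--     return ''.join(result)
-- ===== SOURCE B (Python) =====
-- ALPHABET = "0123456789abcdefghijklmnopqrstuvwxyzABCDEFGHIJKLMNOPQRSTUVWXYZ"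
--
-- def id2mid(id):
--     # Decode the whole id into ONE integer, then peel the mid groups off
--     # arithmetically with divmod by 62**4 -- no chunk slicing, no reversal.
--     id = str(id)
--     if not id:
--         return ''
--     n = 0
--     for ch in id:
--         n = n * 62 + ALPHABET.index(ch)
--     M = 62 ** 4
--     out = []
--     for _ in range((len(id) + 3) // 4 - 1):
--         n, r = divmod(n, M)
--         s = str(r)
--         out.append('0' * (7 - len(s)) + s)
--     out.append(str(n))
--     return ''.join(reversed(out))
-- ===== Notes on version B (the rewrite author's own statement) =====
-- stated objective: alternative
-- what changed: B never slices the id into chunks: it decodes the WHOLE string once into a single big integer, then extracts the mid groups purely arithmetically by repeated divmod by 62**4 (each remainder is one zero-padded 7-digit group, the final quotient is the unpadded leading group), building the output LSB-first and reversing once; A instead reverses the string, slices out 4-char substrings, re-reverses and base62-decodes each substring separately. …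
import Mathlib
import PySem

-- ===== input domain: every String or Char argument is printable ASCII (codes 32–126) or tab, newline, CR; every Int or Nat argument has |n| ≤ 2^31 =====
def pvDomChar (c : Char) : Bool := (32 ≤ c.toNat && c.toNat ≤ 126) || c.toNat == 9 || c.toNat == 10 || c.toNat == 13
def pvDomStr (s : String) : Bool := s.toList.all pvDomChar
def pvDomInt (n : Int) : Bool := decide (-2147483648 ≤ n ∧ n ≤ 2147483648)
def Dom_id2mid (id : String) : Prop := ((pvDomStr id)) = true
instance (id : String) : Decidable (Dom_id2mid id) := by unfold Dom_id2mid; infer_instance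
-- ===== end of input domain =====

-- B replaces A's reverse/slice/decode-each-chunk algorithm by a single whole-string base62
-- decode followed by arithmetic group extraction via repeated divmod by 62^4 (objective: alternative).

-- ===== PORT A =====

-- ALPHABET
def pvAlpha : List Char := "0123456789abcdefghijklmnopqrstuvwxyzABCDEFGHIJKLMNOPQRSTUVWXYZ".toList

-- ALPHABET.index(c); the ValueError for c ∉ ALPHABET is excluded by Pre_id2mid, so the getD 0 default is never taken
def pvAlphaIdx (c : Char) : Int := ((PySem.List.index? pvAlpha c).getD 0 : Nat)

-- base62_decode(string): state is (num, idx); power = strlen - (idx + 1) is ≥ 0 throughout the loop, so Nat subtraction is exact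
def base62_decode (s : List Char) : Int :=
  (s.foldl (fun (st : Int × Nat) c =>
      (st.1 + pvAlphaIdx c * (62 : Int) ^ (s.length - (st.2 + 1)), st.2 + 1))
    ((0 : Int), (0 : Nat))).1

def id2mid (id : String) : String :=
  let idr : List Char := id.toList.reverse        -- id = str(id)[::-1]
  let n := idr.length
  let size : Nat := if n % 4 == 0 then n / 4 else n / 4 + 1   -- int(n/4) is exact floor division here
  let result : List (List Char) :=
    (List.range size).foldl (fun acc i =>
      let s := ((idr.drop (i * 4)).take 4).reverse          -- id[i*4:(i+1)*4][::-1]; nonneg slice = drop/take, (i+1)*4 - i*4 = 4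
      let s := (PySem.Int.toStr (base62_decode s)).toList   -- str(base62_decode(str(s)))
      let sLen := s.length
      let s := if i < size - 1 ∧ sLen < 7 then List.replicate (7 - sLen) '0' ++ s else s
      acc ++ [s]) []
  String.ofList (result.reverse.flatten)          -- result.reverse(); return ''.join(result)

-- ===== PORT B =====

-- the whole-string decode loop: n = n * 62 + ALPHABET.index(ch)
def pvDecode (cs : List Char) : Int := cs.foldl (fun n c => n * 62 + pvAlphaIdx c) 0

-- B's divmod loop body: n, r = divmod(n, M); out.append('0'*(7-len(s)) + s); '0'*k is [] for k ≤ 0 (Nat sub)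
def pvStepB (st : Int × List (List Char)) : Int × List (List Char) :=
  let q := PySem.Int.floordiv st.1 (62 ^ 4)
  let r := PySem.Int.mod st.1 (62 ^ 4)
  let s := (PySem.Int.toStr r).toList
  (q, st.2 ++ [List.replicate (7 - s.length) '0' ++ s])

def id2mid_alt (id : String) : String :=
  let L := id.toList                              -- id = str(id)
  if L.isEmpty then "" else                       -- if not id: return ''
  let n := pvDecode L
  let st := (List.range ((L.length + 3) / 4 - 1)).foldl (fun st _ => pvStepB st) (n, [])
  let out := st.2 ++ [(PySem.Int.toStr st.1).toList]   -- out.append(str(n))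
  String.ofList (out.reverse.flatten)             -- ''.join(reversed(out))

-- ===== PRECONDITION & SPEC =====
-- Python A raises ValueError (ALPHABET.index) as soon as some character of id is not base62; exactly those inputs are excluded.
def Pre_id2mid (id : String) : Prop := id.toList.all (fun c => pvAlpha.contains c) = true
instance (id : String) : Decidable (Pre_id2mid id) := by unfold Pre_id2mid; infer_instance
def pvWitness_id2mid : String := "3CVIpa9lFU0"

def Spec_id2mid (id : String) (out : String) : Prop := out = id2mid_alt id
instance (id : String) (out : String) : Decidable (Spec_id2mid id out) := by unfold Spec_id2mid; infer_instance

-- ===== CLAIM (what is proved, stated in full; the proofs are below) =====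
def Claim_equal_id2mid : Prop := ∀ (id : String), Dom_id2mid id → Pre_id2mid id → Spec_id2mid id (id2mid id)

-- ===== LEMMAS AND PROOFS =====

-- ceil(n/4), as A computes it
def pvSize (n : Nat) : Nat := if n % 4 == 0 then n / 4 else n / 4 + 1

-- A's loop body at index i (over the reversed list), as a map function
def pvEntryA (L : List Char) (size i : Nat) : List Char :=
  let s := ((L.reverse.drop (i * 4)).take 4).reverse
  let s := (PySem.Int.toStr (base62_decode s)).toList
  if i < size - 1 ∧ s.length < 7 then List.replicate (7 - s.length) '0' ++ s else s

-- the common value of both programs: the part strings, least-significant group first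
def pvParts (L : List Char) : List (List Char) :=
  if L.length ≤ 4 then [(PySem.Int.toStr (pvDecode L)).toList]
  else
    let s := (PySem.Int.toStr (pvDecode (L.drop (L.length - 4)))).toList
    (List.replicate (7 - s.length) '0' ++ s) :: pvParts (L.take (L.length - 4))
  termination_by L.length
  decreasing_by simp; omega

lemma id2mid_char (id : String) :
    id2mid id = String.ofList ((((List.range (pvSize id.toList.length)).map
      (pvEntryA id.toList (pvSize id.toList.length))).reverse).flatten) := by
  unfold id2mid pvSize pvEntryA
  simp only [List.length_reverse, PySem.List.foldl_append_singleton_eq_map, List.nil_append]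

lemma horner_acc (cs : List Char) : ∀ a : Int,
    cs.foldl (fun num c => num * 62 + pvAlphaIdx c) a = a * 62 ^ cs.length + pvDecode cs := by
  induction cs with
  | nil => intro a; simp [pvDecode]
  | cons c cs ih =>
    intro a
    have h2 : pvDecode (c :: cs) = (0 * 62 + pvAlphaIdx c) * 62 ^ cs.length + pvDecode cs := by
      unfold pvDecode; rw [List.foldl_cons, ih]; rfl
    rw [List.foldl_cons, ih, h2, List.length_cons]
    ring

lemma base62_aux (cs : List Char) : ∀ (N : Nat) (a : Int) (k : Nat), N = k + cs.length →
    (cs.foldl (fun (st : Int × Nat) c =>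
        (st.1 + pvAlphaIdx c * (62 : Int) ^ (N - (st.2 + 1)), st.2 + 1)) (a, k)).1
      = a + pvDecode cs := by
  induction cs with
  | nil => intro N a k _; simp [pvDecode]
  | cons c cs ih =>
    intro N a k hN
    simp only [List.length_cons] at hN
    rw [List.foldl_cons]
    rw [ih N _ (k+1) (by omega)]
    have hp : N - (k + 1) = cs.length := by omega
    have h2 : pvDecode (c :: cs) = (0 * 62 + pvAlphaIdx c) * 62 ^ cs.length + pvDecode cs := by
      unfold pvDecode; rw [List.foldl_cons, horner_acc]; rfl
    rw [hp, h2]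
    ring

lemma base62_eq_decode (cs : List Char) : base62_decode cs = pvDecode cs := by
  unfold base62_decode
  rw [base62_aux cs cs.length 0 0 (by omega)]
  ring

lemma chunk_eq (L : List Char) (a i : Nat) (ha : a + i = L.length) :
    ((L.reverse.drop a).take 4).reverse = (L.drop (i - 4)).take (i - (i - 4)) := by
  rw [List.drop_reverse, List.take_reverse, List.reverse_reverse, List.drop_take]
  have h1 : L.length - a = i := by omega
  rw [h1]
  have h2 : (L.take i).length = i := by
    rw [List.length_take]; omega
  rw [h2]

lemma size_bounds (n : Nat) : n ≤ 4 * pvSize n ∧ ∀ j, j + 1 ≤ pvSize n → 4 * j < n := by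
  unfold pvSize
  have h1 := Nat.div_add_mod n 4
  have h2 : n % 4 < 4 := Nat.mod_lt _ (by omega)
  by_cases h : n % 4 = 0 <;> simp [h] <;> constructor <;> omega

lemma entry_eq (L : List Char) (j : Nat) (hj : j + 1 ≤ pvSize L.length) :
    pvEntryA L (pvSize L.length) j =
      (if 0 < L.length - 4 * j - 4 then
        List.replicate (7 - ((PySem.Int.toStr (pvDecode ((L.drop (L.length - 4 * j - 4)).take ((L.length - 4 * j) - (L.length - 4 * j - 4))))).toList).length) '0'
          ++ (PySem.Int.toStr (pvDecode ((L.drop (L.length - 4 * j - 4)).take ((L.length - 4 * j) - (L.length - 4 * j - 4))))).toList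
      else (PySem.Int.toStr (pvDecode ((L.drop (L.length - 4 * j - 4)).take ((L.length - 4 * j) - (L.length - 4 * j - 4))))).toList) := by
  have hb := size_bounds L.length
  have h4j : 4 * j < L.length := hb.2 j hj
  simp only [pvEntryA]
  rw [chunk_eq L (j * 4) (L.length - 4 * j) (by omega), base62_eq_decode]
  have hcond : (j < pvSize L.length - 1) ↔ (0 < L.length - 4 * j - 4) := by
    unfold pvSize
    have h1 := Nat.div_add_mod L.length 4
    have h2 : L.length % 4 < 4 := Nat.mod_lt _ (by omega)
    by_cases h : L.length % 4 = 0 <;> simp [h] <;> unfold pvSize at hj <;> simp [h] at hj <;> omega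
  set s := (PySem.Int.toStr (pvDecode ((L.drop (L.length - 4 * j - 4)).take ((L.length - 4 * j) - (L.length - 4 * j - 4))))).toList with hs
  by_cases hc : 0 < L.length - 4 * j - 4
  · simp only [hc, if_true, hcond.2 hc, true_and]
    by_cases hlen : s.length < 7
    · simp [hlen]
    · simp [hlen]
      omega
  · simp only [hc, if_false]
    have : ¬ (j < pvSize L.length - 1) := fun h => hc (hcond.1 h)
    simp [this]

-- A's entry list equals pvParts (strong induction, peeling the rightmost 4-char group)
lemma A_parts (L : List Char) (hne : L ≠ []) :
    (List.range (pvSize L.length)).map (pvEntryA L (pvSize L.length)) = pvParts L := by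
  induction hN : L.length using Nat.strong_induction_on generalizing L with
  | _ N ih =>
    subst hN
    have hpos : 0 < L.length := List.length_pos_of_ne_nil hne
    by_cases h4 : L.length ≤ 4
    · have hsz : pvSize L.length = 1 := by
        simp only [pvSize, beq_iff_eq]; split_ifs <;> omega
      rw [hsz]
      have h0 := entry_eq L 0 (by omega)
      rw [if_neg (by omega)] at h0
      have hd : L.drop (L.length - 4 * 0 - 4) = L := by
        have : L.length - 4 * 0 - 4 = 0 := by omega
        rw [this, List.drop_zero]
      have ht : L.length - 4 * 0 - (L.length - 4 * 0 - 4) = L.length := by omega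
      rw [hd, ht, List.take_length] at h0
      rw [hsz] at h0
      rw [pvParts, if_pos h4]
      simp [List.range_succ, h0]
    · rw [not_le] at h4
      set P := L.take (L.length - 4) with hP
      have hPlen : P.length = L.length - 4 := by
        rw [hP, List.length_take]; omega
      have hPne : P ≠ [] := by
        intro h; rw [h] at hPlen; simp at hPlen; omega
      have hsz : pvSize L.length = (pvSize P.length) + 1 := by
        rw [hPlen]
        simp only [pvSize, beq_iff_eq]; split_ifs <;> omega
      rw [hsz, List.range_succ_eq_map, List.map_cons, List.map_map]
      -- head entry
      have h0 := entry_eq L 0 (by omega)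
      rw [if_pos (by omega)] at h0
      have hd0 : L.length - 4 * 0 - 4 = L.length - 4 := by omega
      rw [hd0] at h0
      have ht0 : L.length - 4 * 0 - (L.length - 4) = 4 := by omega
      rw [ht0] at h0
      have htk : (L.drop (L.length - 4)).take 4 = L.drop (L.length - 4) := by
        apply List.take_of_length_le
        rw [List.length_drop]; omega
      rw [htk] at h0
      -- tail entries shift to P
      have hshift : ∀ j, j + 1 ≤ pvSize P.length →
          pvEntryA L (pvSize L.length) (j + 1) = pvEntryA P (pvSize P.length) j := by
        intro j hj
        rw [entry_eq L (j+1) (by omega), entry_eq P j hj, hPlen]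
        have ha : L.length - 4 * (j + 1) - 4 = L.length - 4 - 4 * j - 4 := by omega
        rw [ha]
        have hw : L.length - 4 * (j + 1) - (L.length - 4 - 4 * j - 4)
            = L.length - 4 - 4 * j - (L.length - 4 - 4 * j - 4) := by omega
        rw [hw]
        have hchunk : P.drop (L.length - 4 - 4 * j - 4) = (L.drop (L.length - 4 - 4 * j - 4)).take
            (L.length - 4 - (L.length - 4 - 4 * j - 4)) := by
          rw [hP, List.drop_take]
        rw [hchunk, List.take_take]
        have : min (L.length - 4 - 4 * j - (L.length - 4 - 4 * j - 4))
            (L.length - 4 - (L.length - 4 - 4 * j - 4)) =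
            L.length - 4 - 4 * j - (L.length - 4 - 4 * j - 4) := by omega
        rw [this]
      rw [hsz] at h0 hshift
      have hmap : (List.range (pvSize P.length)).map (pvEntryA L (pvSize P.length + 1) ∘ Nat.succ) =
          (List.range (pvSize P.length)).map (pvEntryA P (pvSize P.length)) := by
        apply List.map_congr_left
        intro j hj
        rw [List.mem_range] at hj
        simp only [Function.comp_apply, Nat.succ_eq_add_one]
        exact hshift j (by omega)
      rw [hmap, ih P.length (by omega) P hPne rfl, h0]
      conv_rhs => rw [pvParts]
      rw [if_neg (by omega : ¬ L.length ≤ 4), ← hP]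

-- index into the 62-char alphabet is < 62 (and ≥ 0 by construction)
lemma alphaIdx_lt (c : Char) : pvAlphaIdx c < 62 := by
  unfold pvAlphaIdx
  cases h : PySem.List.index? pvAlpha c with
  | none => simp
  | some k =>
    obtain ⟨hk, -, -⟩ := PySem.List.getElem_of_index?_eq_some h
    simp only [Option.getD_some]
    have : pvAlpha.length = 62 := by decide
    omega

lemma alphaIdx_nonneg (c : Char) : 0 ≤ pvAlphaIdx c := by
  unfold pvAlphaIdx; positivity

lemma decode_nonneg (cs : List Char) : 0 ≤ pvDecode cs := by
  unfold pvDecode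
  suffices h : ∀ a : Int, 0 ≤ a → 0 ≤ cs.foldl (fun n c => n * 62 + pvAlphaIdx c) a from
    h 0 le_rfl
  induction cs with
  | nil => intro a ha; simpa using ha
  | cons c cs ih =>
    intro a ha
    rw [List.foldl_cons]
    exact ih _ (by have := alphaIdx_nonneg c; nlinarith)

lemma decode_lt (cs : List Char) : pvDecode cs < 62 ^ cs.length := by
  induction cs with
  | nil => simp [pvDecode]
  | cons c cs ih =>
    have h2 : pvDecode (c :: cs) = (0 * 62 + pvAlphaIdx c) * 62 ^ cs.length + pvDecode cs := by
      unfold pvDecode; rw [List.foldl_cons, horner_acc]; rfl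
    have h3 := alphaIdx_lt c
    have h4 := alphaIdx_nonneg c
    have h5 : (0:Int) < 62 ^ cs.length := by positivity
    rw [h2, List.length_cons, pow_succ]
    nlinarith

lemma decode_append (P S : List Char) :
    pvDecode (P ++ S) = pvDecode P * 62 ^ S.length + pvDecode S := by
  unfold pvDecode
  rw [List.foldl_append, horner_acc]
  rfl

-- divmod step on a split decode
lemma divmod_decode (L : List Char) (h4 : 4 < L.length) :
    PySem.Int.floordiv (pvDecode L) (62 ^ 4) = pvDecode (L.take (L.length - 4)) ∧
    PySem.Int.mod (pvDecode L) (62 ^ 4) = pvDecode (L.drop (L.length - 4)) := by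
  have hsplit := decode_append (L.take (L.length - 4)) (L.drop (L.length - 4))
  rw [List.take_append_drop] at hsplit
  have hlen : (L.drop (L.length - 4)).length = 4 := by
    rw [List.length_drop]; omega
  have hlt := decode_lt (L.drop (L.length - 4))
  have hge := decode_nonneg (L.drop (L.length - 4))
  rw [hlen] at hsplit hlt
  have hM : ((62:Int) ^ 4) = 14776336 := by norm_num
  rw [PySem.Int.floordiv_eq_ediv_of_pos (by norm_num), PySem.Int.mod_eq_emod_of_pos (by norm_num),
    hM] at *
  constructor <;> omega

-- a foldl over range that ignores the index is iteration
lemma foldl_range_iterate {α : Type} (g : α → α) (m : Nat) (s : α) :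
    (List.range m).foldl (fun st _ => g st) s = g^[m] s := by
  induction m generalizing s with
  | zero => simp
  | succ m ih => rw [List.range_succ, List.foldl_append, ih, Function.iterate_succ_apply']; simp

-- B's loop computes pvParts
lemma B_loop (L : List Char) (hne : L ≠ []) : ∀ acc : List (List Char),
    (let st := pvStepB^[pvSize L.length - 1] (pvDecode L, acc);
     st.2 ++ [(PySem.Int.toStr st.1).toList]) = acc ++ pvParts L := by
  induction hN : L.length using Nat.strong_induction_on generalizing L with
  | _ N ih =>
    intro acc
    subst hN
    have hpos : 0 < L.length := List.length_pos_of_ne_nil hne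
    by_cases h4 : L.length ≤ 4
    · have hsz : pvSize L.length = 1 := by
        simp only [pvSize, beq_iff_eq]; split_ifs <;> omega
      rw [hsz]
      simp only [Nat.sub_self, Function.iterate_zero, id_eq]
      rw [pvParts]
      simp [h4]
    · rw [not_le] at h4
      set P := L.take (L.length - 4) with hP
      have hPlen : P.length = L.length - 4 := by
        rw [hP, List.length_take]; omega
      have hPne : P ≠ [] := by
        intro h; rw [h] at hPlen; simp at hPlen; omega
      have hsz : pvSize L.length - 1 = (pvSize P.length - 1) + 1 := by
        rw [hPlen]
        simp only [pvSize, beq_iff_eq]; split_ifs <;> omega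
      have hstep : pvStepB (pvDecode L, acc) =
          (pvDecode P, acc ++ [List.replicate
            (7 - ((PySem.Int.toStr (pvDecode (L.drop (L.length - 4)))).toList).length) '0'
            ++ (PySem.Int.toStr (pvDecode (L.drop (L.length - 4)))).toList]) := by
        obtain ⟨hq, hr⟩ := divmod_decode L h4
        simp only [pvStepB, hq, hr, hP]
      rw [hsz, Function.iterate_succ_apply, hstep,
        ih P.length (by omega) P hPne rfl]
      conv_rhs => rw [pvParts]
      rw [if_neg (by omega : ¬ L.length ≤ 4), ← hP]
      simp

lemma size_eq (n : Nat) : (n + 3) / 4 = pvSize n := by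
  unfold pvSize
  have h1 := Nat.div_add_mod n 4
  have h2 : n % 4 < 4 := Nat.mod_lt _ (by omega)
  by_cases h : n % 4 = 0 <;> simp [h] <;> omega

-- ===== VERDICT (by name: the statement is the Claim_ definition above) =====
theorem id2mid_spec : Claim_equal_id2mid := by
  unfold Claim_equal_id2mid
  intro id _ _
  unfold Spec_id2mid
  rw [id2mid_char]
  by_cases hne : id.toList = []
  · simp [id2mid_alt, hne, pvSize]
  · simp only [id2mid_alt, List.isEmpty_eq_false_iff.mpr hne, Bool.false_eq_true, if_false,
      size_eq, foldl_range_iterate]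
    rw [B_loop id.toList hne [], List.nil_append, A_parts id.toList hne]
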